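-- pv_equiv track=rewrite | github.com/donghyuun/-Algorithm | programmers/level1/과일 장수.py | solution
-- ===== SOURCE A (Python) =====
-- def solution(k, m, score):
--     s_len = len(score)
--     answer = 0
--     cnt = 0
--     for i in range(s_len):
--         maxS = max(score)
--         score.remove(max(score))
--         cnt+=1
--         if cnt%m == 0:
--             answer+=m*maxS
--
--     return answer
-- ===== SOURCE B (Python) =====
-- def solution(k, m, score):
--     s = sorted(score, reverse=True)
--     return sum(m * s[i] for i in range(m - 1, len(s), m))
-- ===== Notes on version B (the rewrite author's own statement) =====
-- stated objective: faster
-- what changed: Replaces the O(n^2) repeated max+remove loop with one descending sort followed by summing m*value at every m-th position of the sorted list.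
-- outside the precondition, e.g. on solution(0, -2, [1, 2, 3]): A returns -4, B returns 0
import Mathlib
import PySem

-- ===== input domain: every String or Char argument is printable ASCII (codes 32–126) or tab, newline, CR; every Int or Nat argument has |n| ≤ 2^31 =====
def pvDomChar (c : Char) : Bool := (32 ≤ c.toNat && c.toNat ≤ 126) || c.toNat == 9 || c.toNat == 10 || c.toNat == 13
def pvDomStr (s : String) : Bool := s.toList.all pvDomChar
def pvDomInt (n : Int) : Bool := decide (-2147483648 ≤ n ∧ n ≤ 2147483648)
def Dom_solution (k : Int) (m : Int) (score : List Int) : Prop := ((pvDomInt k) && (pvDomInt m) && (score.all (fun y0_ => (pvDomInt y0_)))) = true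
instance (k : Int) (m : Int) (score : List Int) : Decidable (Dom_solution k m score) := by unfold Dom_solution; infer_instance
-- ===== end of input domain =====

-- B replaces A's quadratic repeated max+remove loop by one descending sort and a strided sum
-- (objective: faster). Note: Python A mutates `score` in place (it empties it); B does not —
-- the equivalence proved here is about the return value only.

-- ===== PORT A =====
-- A's loop, fuel = initial len(score): each pass takes max(score), removes its first
-- occurrence, increments cnt, and when cnt % m == 0 adds m*max to answer.
-- The `none` branches (max/remove on an empty list) are unreachable since fuel = length.
def solutionLoop (m : Int) : Nat → List Int → Int → Int → Int
  | 0, _, answer, _ => answer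
  | n + 1, score, answer, cnt =>
    match PySem.List.max? score (fun x => x) with
    | none => answer
    | some maxS =>
      let score' := (PySem.List.remove? score maxS).getD []
      let cnt' := cnt + 1
      let answer' := if PySem.Int.mod cnt' m = 0 then answer + m * maxS else answer
      solutionLoop m n score' answer' cnt'

def solution (k : Int) (m : Int) (score : List Int) : Int :=
  solutionLoop m score.length score 0 0

-- ===== PORT B =====
-- Source B: s = sorted(score, reverse=True); sum(m * s[i] for i in range(m - 1, len(s), m))
def solution_alt (k : Int) (m : Int) (score : List Int) : Int :=
  let s := PySem.List.sorted score (fun x => x) true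
  ((PySem.List.pyRange (m - 1) (PySem.List.len s) m).map
      (fun i => m * PySem.List.pyGetD s i 0)).sum

-- ===== PRECONDITION & SPEC =====
-- Pre_ restricts m to the problem's natural domain m ≥ 1 (a box holds m fruits): for m = 0
-- A raises ZeroDivisionError (cnt % m); for m < 0 A returns a value only by the accident of
-- Python's negative-modulo semantics, which B's range-based sum does not reproduce (cited in claim.json).
def Pre_solution (k : Int) (m : Int) (score : List Int) : Prop := 1 ≤ m
instance (k : Int) (m : Int) (score : List Int) : Decidable (Pre_solution k m score) := by
  unfold Pre_solution; infer_instance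

def pvWitness_solution : Int × Int × List Int := (4, 3, [1, 2, 3, 1, 2, 3, 1])

def Spec_solution (k : Int) (m : Int) (score : List Int) (out : Int) : Prop := out = solution_alt k m score
instance (k : Int) (m : Int) (score : List Int) (out : Int) : Decidable (Spec_solution k m score out) := by unfold Spec_solution; infer_instance

-- ===== CLAIM (what is proved, stated in full; the proofs are below) =====
def Claim_equal_solution : Prop := ∀ (k : Int) (m : Int) (score : List Int), Dom_solution k m score → Pre_solution k m score → Spec_solution k m score (solution k m score)

-- ===== LEMMAS AND PROOFS =====

-- A's loop, re-expressed on the sorted list: payout at the element seen with counter c+1 when (c+1) % m == 0.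
def gI (m : Int) : List Int → Int → Int
  | [], _ => 0
  | x :: t, c => (if PySem.Int.mod (c + 1) m = 0 then m * x else 0) + gI m t (c + 1)

-- The same with a Nat countdown j to the next payout (j = 0 pays, then resets to mN - 1).
def gN (m : Int) (mN : Nat) : List Int → Nat → Int
  | [], _ => 0
  | x :: t, 0 => m * x + gN m mN t (mN - 1)
  | _ :: t, j + 1 => gN m mN t j

-- Popping the max from s is taking the head of the descending sort.
theorem sortedRev_cons_max (s : List Int) (M : Int)
    (hM : PySem.List.max? s (fun x => x) = some M) :
    PySem.List.sorted s (fun x => x) true = M :: PySem.List.sorted (s.erase M) (fun x => x) true := by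
  have hMmem : M ∈ s := PySem.List.max?_mem hM
  have hmax := PySem.List.max?_isMax hM
  apply List.Perm.eq_of_pairwise (le := fun a b => b ≤ a)
  · intro a b _ _ h1 h2; omega
  · exact PySem.List.sorted_pairwise_rev s _
  · constructor
    · intro y hy
      have : y ∈ s.erase M := (PySem.List.mem_sorted _ _ _ _).1 hy
      exact hmax y (List.mem_of_mem_erase this)
    · exact PySem.List.sorted_pairwise_rev _ _
  · exact ((PySem.List.sorted_perm s _ _).trans (List.perm_cons_erase hMmem)).trans
      (List.Perm.cons M (PySem.List.sorted_perm _ _ _).symm)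

-- A's loop computes gI over the descending sort of its list argument.
theorem loop_eq_gI (m : Int) : ∀ (n : Nat) (s : List Int) (ans cnt : Int), s.length = n →
    solutionLoop m n s ans cnt = ans + gI m (PySem.List.sorted s (fun x => x) true) cnt := by
  intro n
  induction n with
  | zero =>
    intro s ans cnt hlen
    have hs : s = [] := List.length_eq_zero_iff.mp hlen
    subst hs
    simp [solutionLoop, gI, (PySem.List.sorted_eq_nil_iff ([] : List Int) (fun x => x) true).mpr rfl]
  | succ n ih =>
    intro s ans cnt hlen
    have hs : s ≠ [] := by intro h; subst h; simp at hlen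
    obtain ⟨M, hM⟩ : ∃ M, PySem.List.max? s (fun x => x) = some M := by
      cases h : PySem.List.max? s (fun x => x) with
      | none => exact absurd ((PySem.List.max?_eq_none_iff _ _).1 h) hs
      | some M => exact ⟨M, rfl⟩
    have hMmem : M ∈ s := PySem.List.max?_mem hM
    have hrem : PySem.List.remove? s M = some (s.erase M) := PySem.List.remove?_eq_some_erase s M hMmem
    have hlen' : (s.erase M).length = n := by
      rw [List.length_erase_of_mem hMmem]; omega
    rw [sortedRev_cons_max s M hM]
    simp only [solutionLoop, hM, hrem, Option.getD_some, gI]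
    rw [ih (s.erase M) _ (cnt + 1) hlen']
    split <;> ring

theorem mod_succ_step (m c : Int) (hm : 1 ≤ m) :
    PySem.Int.mod (c + 1) m = if PySem.Int.mod c m = m - 1 then 0 else PySem.Int.mod c m + 1 := by
  rw [PySem.Int.mod_eq_emod_of_pos (by omega), PySem.Int.mod_eq_emod_of_pos (by omega)]
  have hlo : 0 ≤ c % m := Int.emod_nonneg c (by omega)
  have hhi : c % m < m := Int.emod_lt_of_pos c (by omega)
  have key : (c + 1) % m = (c % m + 1) % m := by
    conv_lhs => rw [← Int.mul_ediv_add_emod c m]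
    rw [show m * (c / m) + c % m + 1 = c % m + 1 + m * (c / m) by ring, Int.add_mul_emod_self_left]
  rw [key]
  split_ifs with h
  · rw [h, show m - 1 + 1 = m by ring, Int.emod_self]
  · exact Int.emod_eq_of_lt (by omega) (by omega)

theorem gI_eq_gN (m : Int) (hm : 1 ≤ m) : ∀ (s : List Int) (c : Int), 0 ≤ c →
    gI m s c = gN m m.toNat s (m - 1 - PySem.Int.mod c m).toNat := by
  intro s
  induction s with
  | nil => intro c _; simp [gI, gN]
  | cons x t ih =>
    intro c hc
    have hlo : 0 ≤ PySem.Int.mod c m := PySem.Int.mod_nonneg c (by omega)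
    have hhi : PySem.Int.mod c m < m := PySem.Int.mod_lt c (by omega)
    have hstep := mod_succ_step m c hm
    rw [gI, ih (c + 1) (by omega)]
    by_cases h : PySem.Int.mod c m = m - 1
    · have hj : (m - 1 - PySem.Int.mod c m).toNat = 0 := by omega
      have h1 : PySem.Int.mod (c + 1) m = 0 := by rw [hstep]; simp [h]
      rw [hj, h1, gN, if_pos rfl, show (m - 1 - (0:Int)).toNat = m.toNat - 1 by omega]
    · have h1 : PySem.Int.mod (c + 1) m = PySem.Int.mod c m + 1 := by rw [hstep]; simp [h]
      have hne : ¬ PySem.Int.mod (c + 1) m = 0 := by omega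
      obtain ⟨j, hj⟩ : ∃ j, (m - 1 - PySem.Int.mod c m).toNat = j + 1 := ⟨(m - 1 - PySem.Int.mod c m).toNat - 1, by omega⟩
      rw [hj, gN, if_neg hne, h1]
      have : (m - 1 - (PySem.Int.mod c m + 1)).toNat = j := by omega
      rw [this]
      ring

-- gN as a sum of every mN-th element, starting j positions in.
theorem gN_sum (m : Int) (mN : Nat) (hmN : mN = m.toNat) (hm : 1 ≤ m) :
    ∀ (s : List Int) (j : Nat), j < mN →
    gN m mN s j = ((List.range ((s.length + (mN - 1 - j)) / mN)).map
      (fun p => m * s.getD (j + mN * p) 0)).sum := by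
  have hmN1 : 1 ≤ mN := by omega
  intro s
  induction s with
  | nil =>
    intro j hj
    rw [show ([] : List Int).length + (mN - 1 - j) = mN - 1 - j by simp,
        Nat.div_eq_of_lt (by omega)]
    simp [gN]
  | cons x t ih =>
    intro j hj
    cases j with
    | zero =>
      rw [gN, ih (mN - 1) (by omega)]
      have hc1 : ((x :: t).length + (mN - 1 - 0)) / mN = t.length / mN + 1 := by
        rw [List.length_cons, show t.length + 1 + (mN - 1 - 0) = t.length + mN by omega,
            Nat.add_div_right _ (by omega)]
      have hc2 : t.length + (mN - 1 - (mN - 1)) = t.length := by omega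
      rw [hc1, hc2, List.range_succ_eq_map, List.map_cons, List.sum_cons, List.map_map]
      have hterm : ((fun p => m * (x :: t).getD (0 + mN * p) 0) ∘ (fun i => i + 1))
          = fun p => m * t.getD (mN - 1 + mN * p) 0 := by
        funext p
        simp only [Function.comp]
        have : 0 + mN * (p + 1) = (mN - 1 + mN * p) + 1 := by
          have h : mN * (p + 1) = mN * p + mN := Nat.mul_succ mN p
          omega
        rw [this, List.getD_cons_succ]
      rw [hterm]
      simp
    | succ j' =>
      rw [gN, ih j' (by omega)]
      have hc : ((x :: t).length + (mN - 1 - (j' + 1))) / mN = (t.length + (mN - 1 - j')) / mN := by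
        rw [List.length_cons, show t.length + 1 + (mN - 1 - (j' + 1)) = t.length + (mN - 1 - j') by omega]
      rw [hc]
      congr 1
      apply List.map_congr_left
      intro p _
      rw [show j' + 1 + mN * p = (j' + mN * p) + 1 by omega, List.getD_cons_succ]

-- B's strided pyRange sum, rewritten as the same List.range sum.
theorem B_sum (m : Int) (hm : 1 ≤ m) (s : List Int) :
    ((PySem.List.pyRange (m - 1) (PySem.List.len s) m).map
      (fun i => m * PySem.List.pyGetD s i 0)).sum
    = ((List.range (s.length / m.toNat)).map
      (fun p => m * s.getD ((m.toNat - 1) + m.toNat * p) 0)).sum := by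
  rw [PySem.List.len_eq, PySem.List.pyRange_of_pos _ _ (by omega : (0:Int) < m)]
  have hcount : (if m - 1 < (s.length : Int) then (((s.length : Int) - (m - 1) + m - 1) / m).toNat else 0)
      = s.length / m.toNat := by
    split_ifs with h
    · have h1 : (s.length : Int) - (m - 1) + m - 1 = (s.length : Int) := by ring
      rw [h1]
      obtain ⟨q, hq⟩ : ∃ q : Nat, m = (q : Int) := ⟨m.toNat, by omega⟩
      subst hq
      rw [← Int.natCast_div, Int.toNat_natCast, Int.toNat_natCast]
    · have hlt : s.length < m.toNat := by omega
      exact (Nat.div_eq_of_lt hlt).symm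
  rw [hcount, List.map_map]
  congr 1
  apply List.map_congr_left
  intro p _
  simp only [Function.comp]
  have hidx : m - 1 + m * (p : Int) = ((m.toNat - 1 + m.toNat * p : Nat) : Int) := by
    push_cast
    have h3 : ((m.toNat : Nat) : Int) = m := by omega
    rw [Nat.cast_sub (by omega)]
    push_cast [h3]
    ring
  rw [hidx, PySem.List.pyGetD_natCast]

-- ===== VERDICT (by name: the statement is the Claim_ definition above) =====
theorem solution_spec : Claim_equal_solution := by
  intro k m score _ hm
  unfold Spec_solution solution solution_alt
  have hm' : (1 : Int) ≤ m := hm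
  rw [loop_eq_gI m score.length score 0 0 rfl]
  rw [gI_eq_gN m hm' _ 0 le_rfl]
  have h0 : PySem.Int.mod 0 m = 0 := by
    rw [PySem.Int.mod_eq_emod_of_pos (by omega)]; simp
  rw [h0]
  rw [sub_zero, show (m - 1).toNat = m.toNat - 1 by omega]
  rw [gN_sum m m.toNat rfl hm' _ (m.toNat - 1) (by omega)]
  rw [B_sum m hm']
  have : (m.toNat - 1 - (m.toNat - 1)) = 0 := by omega
  rw [this, Nat.add_zero, zero_add]
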